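-- pv_equiv track=rewrite | github.com/rogueinabox/rogueinabox | rogueinabox/rogueinabox.py | _count_passables_in_screen
-- ===== SOURCE A (Python) =====
-- def _count_passables_in_screen(screen):
--     """Count the passable tiles in a given 'screen' (24*80 matrix) and returns it as an int."""
--     passables = 0
--     impassable_pixels =  '|- '
--     for line in screen:
--         for pixel in line:
--             if pixel not in impassable_pixels:
--                 passables += 1
--     return passables
-- ===== SOURCE B (Python) =====
-- def _count_passables_in_screen(screen):
--     """Count the passable tiles in a given 'screen' (24*80 matrix) and returns it as an int."""
--     counts = {}
--     total = 0
--     for line in screen: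
--         total += len(line)
--         for pixel in line:
--             counts[pixel] = counts.get(pixel, 0) + 1
--     return total - sum(c for p, c in counts.items() if p in '|- ')
-- ===== Notes on version B (the rewrite author's own statement) =====
-- stated objective: alternative
-- what changed: B builds a frequency dictionary of the pixels in one aggregation pass and computes the result by complement (total pixels minus the summed counts of the impassable distinct pixels), so the impassable test runs once per distinct pixel instead of once per tile.
import Mathlib
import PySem

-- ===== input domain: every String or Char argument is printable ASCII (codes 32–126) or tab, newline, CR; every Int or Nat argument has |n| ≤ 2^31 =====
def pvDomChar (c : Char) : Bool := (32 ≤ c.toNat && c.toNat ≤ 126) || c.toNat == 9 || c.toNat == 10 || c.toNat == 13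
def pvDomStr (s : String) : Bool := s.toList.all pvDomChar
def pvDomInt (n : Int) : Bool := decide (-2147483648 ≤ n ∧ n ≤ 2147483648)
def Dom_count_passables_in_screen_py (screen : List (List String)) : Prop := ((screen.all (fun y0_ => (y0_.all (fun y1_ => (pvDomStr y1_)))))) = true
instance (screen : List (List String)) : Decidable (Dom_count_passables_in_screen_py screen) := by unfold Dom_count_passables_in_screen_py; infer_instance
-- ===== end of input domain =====

-- B aggregates the pixels into a frequency dictionary in one pass and then obtains
-- the result by complement: total pixels minus the summed counts of the impassable
-- distinct pixels (an alternative algorithm of the same cost).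

-- ===== PORT A =====
-- 'pixel not in "|- "' is Python substring membership: PySem.Str.isIn
def count_passables_in_screen_py (screen : List (List String)) : Int :=
  screen.foldl
    (fun passables line =>
      line.foldl
        (fun acc pixel => if PySem.Str.isIn pixel "|- " then acc else acc + 1)
        passables)
    0

-- ===== PORT B =====
-- counts[pixel] = counts.get(pixel, 0) + 1 over a (dict, total) state, then
-- total - sum(c for p, c in counts.items() if p in '|- ')
def count_passables_in_screen_py_alt (screen : List (List String)) : Int :=
  let st := screen.foldl
    (fun (st : PySem.Dict String Int × Int) line =>
      line.foldl (fun (st : PySem.Dict String Int × Int) pixel =>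
          (st.1.insert pixel (st.1.getD pixel 0 + 1), st.2))
        (st.1, st.2 + (line.length : Int)))
    (PySem.Dict.empty, 0)
  st.2 - (((st.1.items.filter (fun pc => PySem.Str.isIn pc.1 "|- ")).map (fun pc => pc.2)).sum)

-- ===== PRECONDITION & SPEC =====
def Spec_count_passables_in_screen_py (screen : List (List String)) (out : Int) : Prop := out = count_passables_in_screen_py_alt screen
instance (screen : List (List String)) (out : Int) : Decidable (Spec_count_passables_in_screen_py screen out) := by unfold Spec_count_passables_in_screen_py; infer_instance

-- ===== CLAIM (what is proved, stated in full; the proofs are below) =====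
def Claim_equal_count_passables_in_screen_py : Prop := ∀ (screen : List (List String)), Dom_count_passables_in_screen_py screen → Spec_count_passables_in_screen_py screen (count_passables_in_screen_py screen)

-- ===== LEMMAS AND PROOFS =====

-- A's inner loop over one line counts the pixels that are not substrings of '|- '
theorem pv_inner (line : List String) (a : Int) :
    line.foldl
        (fun acc pixel => if PySem.Str.isIn pixel "|- " then acc else acc + 1) a
      = a + (line.countP (fun p => !PySem.Str.isIn p "|- ") : Int) := by
  induction line generalizing a with
  | nil => simp
  | cons x xs ih =>
    rw [List.foldl_cons, List.countP_cons]
    cases hx : PySem.Str.isIn x "|- "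
    · simp only [Bool.not_false, ih]
      push_cast; ring
    · simp only [Bool.not_true, if_true, ih]
      simp

-- A's outer loop: the passable count of the flattened pixel list
theorem pv_outer (screen : List (List String)) (a : Int) :
    screen.foldl
        (fun passables line =>
          line.foldl
            (fun acc pixel => if PySem.Str.isIn pixel "|- " then acc else acc + 1)
            passables) a
      = a + (screen.flatten.countP (fun p => !PySem.Str.isIn p "|- ") : Int) := by
  induction screen generalizing a with
  | nil => simp
  | cons line rest ih =>
    rw [List.foldl_cons, pv_inner, ih, List.flatten_cons, List.countP_append]
    push_cast; ring

-- B's pair-state loop splits: the dict is the insert-counter fold over the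
-- flattened pixels and the total is the number of pixels
theorem pv_fold_pair (screen : List (List String)) (d : PySem.Dict String Int) (t : Int) :
    screen.foldl
      (fun (st : PySem.Dict String Int × Int) line =>
        line.foldl (fun (st : PySem.Dict String Int × Int) pixel =>
            (st.1.insert pixel (st.1.getD pixel 0 + 1), st.2))
          (st.1, st.2 + (line.length : Int)))
      (d, t)
    = (screen.flatten.foldl (fun d x => d.insert x (d.getD x 0 + 1)) d,
       t + (screen.flatten.length : Int)) := by
  induction screen generalizing d t with
  | nil => simp
  | cons line rest ih =>
    rw [List.foldl_cons]
    have hline : ∀ (l : List String) (d : PySem.Dict String Int) (t : Int),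
        l.foldl (fun (st : PySem.Dict String Int × Int) pixel =>
            (st.1.insert pixel (st.1.getD pixel 0 + 1), st.2)) (d, t)
          = (l.foldl (fun d x => d.insert x (d.getD x 0 + 1)) d, t) := by
      intro l
      induction l with
      | nil => intro d t; rfl
      | cons x xs ihx => intro d t; rw [List.foldl_cons, List.foldl_cons, ihx]
    rw [hline, ih]
    simp only [List.flatten_cons, List.foldl_append, List.length_append]
    push_cast
    rw [Prod.mk.injEq]
    exact ⟨rfl, by ring⟩

-- summing the counter's values over the impassable distinct pixels gives the
-- number of impassable pixels
theorem pv_sum_counter (ps : List String) :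
    (((PySem.Dict.counter ps).items.filter (fun pc => PySem.Str.isIn pc.1 "|- ")).map
        (fun pc => pc.2)).sum
      = (ps.countP (fun p => PySem.Str.isIn p "|- ") : Int) := by
  rw [PySem.Dict.items_counter, List.filter_map, List.map_map]
  have hcast : ∀ (l : List String),
      (l.map ((fun pc : String × Int => pc.2) ∘ fun k => (k, (ps.count k : Int)))).sum
        = ((l.map (fun k => ps.count k)).sum : Int) := by
    intro l
    induction l with
    | nil => rfl
    | cons x xs ihx => simp [ihx]
  rw [hcast]
  have hperm : (PySem.Set.ofList ps).Perm ps.dedup := by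
    rw [List.perm_ext_iff_of_nodup (PySem.Set.nodup_ofList ps) ps.nodup_dedup]
    intro a
    rw [PySem.Set.mem_ofList, List.mem_dedup]
  have hperm2 := ((hperm.filter (fun k => PySem.Str.isIn k "|- ")).map
      (fun k => ps.count k)).sum_eq
  rw [Function.comp_def] at *
  rw [hperm2, List.sum_map_count_dedup_filter_eq_countP]

-- ===== VERDICT (by name: the statement is the Claim_ definition above) =====
theorem count_passables_in_screen_py_spec : Claim_equal_count_passables_in_screen_py := by
  intro screen _
  unfold Spec_count_passables_in_screen_py count_passables_in_screen_py count_passables_in_screen_py_alt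
  rw [pv_outer, pv_fold_pair, PySem.Dict.foldl_insert_getD_add_one_eq_counter]
  simp only [pv_sum_counter]
  have hsplit := List.length_eq_countP_add_countP (fun p => PySem.Str.isIn p "|- ")
    (l := screen.flatten)
  simp only [decide_not, Bool.decide_eq_true] at hsplit
  omega
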